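-- pv_equiv track=rewrite | github.com/kuznetsovvj/education | algorithms/codeforces/550a.py | check
-- ===== SOURCE A (Python) =====
-- def check(w):
--     s, k = 0, 0
--     r_a, r_b = set(), set()
--     while k != -1:
--         k = w.find('AB', s)
--         if k != -1:
--             s = k + 1
--             r_a.add(s)
--
--     s, k = 0, 0
--     while k != -1:
--         k = w.find('BA', s)
--         if k != -1:
--             s = k + 1
--             r_b.add(s)
--
--     if len(r_a) == 0 or len(r_b) == 0:
--         return 'NO'
--
--     if len(r_a) == 1 and len(r_b) == 1:
--         a = r_a.pop()
--         b = r_b.pop()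
--         if a == b - 1 or b == a - 1:
--             return 'NO'
--
--     if len(r_a) == 1:
--         a = r_a.pop()
--         if any([i for i in r_b if i != a +1 and i != a - 1]):
--             return 'YES'
--         else:
--             return 'NO'
--
--     if len(r_b) == 1:
--         b = r_b.pop()
--         if any([i for i in r_a if i != b +1 and i != b - 1]):
--             return 'YES'
--         else:
--             return 'NO'
--
--     return 'YES'
-- ===== SOURCE B (Python) =====
-- def check(w):
--     i = w.find('AB')
--     if i != -1 and w.find('BA', i + 2) != -1:
--         return 'YES'
--     j = w.find('BA')
--     if j != -1 and w.find('AB', j + 2) != -1: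
--         return 'YES'
--     return 'NO'
-- ===== Notes on version B (the rewrite author's own statement) =====
-- stated objective: simpler
-- what changed: Replaces the two set-building scan loops and the four-way cardinality case analysis with two find calls per direction: locate the first occurrence of one pattern, then search for the other pattern from offset +2 (which enforces non-overlap), trying both orders.
import Mathlib
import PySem

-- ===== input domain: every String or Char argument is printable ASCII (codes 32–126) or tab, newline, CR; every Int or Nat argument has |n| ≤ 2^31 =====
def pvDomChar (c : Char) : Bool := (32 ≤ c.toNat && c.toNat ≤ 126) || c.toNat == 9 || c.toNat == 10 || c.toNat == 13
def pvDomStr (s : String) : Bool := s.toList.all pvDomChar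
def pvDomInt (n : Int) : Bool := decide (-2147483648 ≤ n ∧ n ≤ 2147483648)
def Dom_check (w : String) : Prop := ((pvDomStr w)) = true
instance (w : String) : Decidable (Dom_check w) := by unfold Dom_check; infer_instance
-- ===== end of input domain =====

-- B replaces A's two set-building scan loops and cardinality case analysis by two
-- find calls per direction (second find started at offset +2, which enforces
-- non-overlap); same O(n) cost, much shorter.

-- ===== PORT A =====

/-- Python `set.pop()`: A only calls it on sets it has just checked to be
    singletons (or that have become empty, where the result is discarded), so
    (head, tail) with a dummy for the empty set is exact here. -/
def setPop (s : PySem.Set Int) : Int × PySem.Set Int :=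
  match s with
  | [] => (0, [])
  | x :: t => (x, t)

/-- A's `while k != -1` scan loop: repeatedly `k = w.find(sub, s)`, then
    `s = k + 1; r.add(s)`.  `fuel = w.length + 1` bounds the iteration count
    (each successful find advances `s` by at least 1). -/
def collectFind (w : List Char) (sub : List Char) : Nat → Nat → PySem.Set Int → PySem.Set Int
  | 0, _, acc => acc
  | fuel+1, s, acc =>
    let k := PySem.Chars.findFrom w sub (s : Int) none
    if k = -1 then acc
    else collectFind w sub fuel (k.toNat + 1) (PySem.Set.add acc (k + 1))

/-- lines of A after the two scan loops: the cardinality case analysis with its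
    pops (the singleton/singleton branch pops both sets whether or not it returns). -/
def afterLoops (r_a r_b : PySem.Set Int) : String :=
  if PySem.Set.len r_a = 0 ∨ PySem.Set.len r_b = 0 then "NO"
  else
    let st :=
      if PySem.Set.len r_a = 1 ∧ PySem.Set.len r_b = 1 then
        let (a, r_a') := setPop r_a
        let (b, r_b') := setPop r_b
        if a = b - 1 ∨ b = a - 1 then (some "NO", r_a', r_b')
        else (none, r_a', r_b')
      else (none, r_a, r_b)
    match st with
    | (some r, _, _) => r
    | (none, ra, rb) =>
      if PySem.Set.len ra = 1 then
        let (a, _) := setPop ra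
        if rb.any (fun i => decide (i ≠ a + 1 ∧ i ≠ a - 1)) then "YES" else "NO"
      else if PySem.Set.len rb = 1 then
        let (b, _) := setPop rb
        if ra.any (fun i => decide (i ≠ b + 1 ∧ i ≠ b - 1)) then "YES" else "NO"
      else "YES"

def check (w : String) : String :=
  let l := w.toList
  let r_a := collectFind l ['A', 'B'] (l.length + 1) 0 PySem.Set.empty
  let r_b := collectFind l ['B', 'A'] (l.length + 1) 0 PySem.Set.empty
  afterLoops r_a r_b

-- ===== PORT B =====

def check_alt (w : String) : String :=
  let i := PySem.Str.find w "AB"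
  if i ≠ -1 ∧ PySem.Str.findFrom w "BA" (i + 2) none ≠ -1 then "YES"
  else
    let j := PySem.Str.find w "BA"
    if j ≠ -1 ∧ PySem.Str.findFrom w "AB" (j + 2) none ≠ -1 then "YES"
    else "NO"

-- ===== PRECONDITION & SPEC =====
def Spec_check (w : String) (out : String) : Prop := out = check_alt w
instance (w : String) (out : String) : Decidable (Spec_check w out) := by unfold Spec_check; infer_instance

-- ===== CLAIM (what is proved, stated in full; the proofs are below) =====
def Claim_equal_check : Prop := ∀ (w : String), Dom_check w → Spec_check w (check w)

-- ===== LEMMAS AND PROOFS =====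

/-- positions (in increasing order) at which `sub` occurs in `l` -/
def occList (l sub : List Char) : List Nat :=
  (List.range l.length).filter (fun i => sub.isPrefixOf (l.drop i))

lemma mem_occList {l sub : List Char} (h2 : sub.length = 2) {i : Nat} :
    i ∈ occList l sub ↔ sub <+: l.drop i := by
  unfold occList
  simp only [List.mem_filter, List.mem_range, List.isPrefixOf_iff_prefix]
  constructor
  · exact fun h => h.2
  · intro h
    refine ⟨?_, h⟩
    have := h.length_le
    simp [List.length_drop, h2] at this
    omega

lemma occList_pairwise (l sub : List Char) : (occList l sub).Pairwise (· < ·) :=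
  List.Pairwise.filter _ List.pairwise_lt_range

lemma occ_bound {l sub : List Char} (h2 : sub.length = 2) {i : Nat}
    (h : sub <+: l.drop i) : i + 2 ≤ l.length := by
  have := h.length_le
  simp [List.length_drop, h2] at this
  omega

/-- an AB occurrence and a BA occurrence never share a position -/
lemma occ_ne {l : List Char} {i : Nat}
    (ha : ['A','B'] <+: l.drop i) (hb : ['B','A'] <+: l.drop i) : False := by
  rcases ha with ⟨ta, ha⟩; rcases hb with ⟨tb, hb⟩
  rw [← hb] at ha
  simp at ha

/-- two distinct AB occurrences are at distance ≥ 2 (likewise BA, by symmetry of use) -/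
lemma occ_gap {l : List Char} {c d : Char} (hcd : c ≠ d) {i : Nat}
    (ha : [c,d] <+: l.drop i) (hb : [c,d] <+: l.drop (i+1)) : False := by
  rcases ha with ⟨ta, ha⟩
  rcases hb with ⟨tb, hb⟩
  have : l.drop (i+1) = d :: ta := by
    have := congrArg (List.drop 1) ha
    simpa [List.drop_drop] using this.symm
  rw [this] at hb
  simp at hb
  exact hcd hb.1

/-- the filter of a strictly sorted list from its minimum-above-s element -/
lemma filter_sorted_min {os : List Nat} (hs : os.Pairwise (· < ·)) {k s : Nat}
    (hk : k ∈ os) (hsk : s ≤ k) (hmin : ∀ i ∈ os, s ≤ i → k ≤ i) :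
    os.filter (fun i => decide (s ≤ i)) = k :: os.filter (fun i => decide (k + 1 ≤ i)) := by
  induction os with
  | nil => simp at hk
  | cons a t ih =>
    rcases List.pairwise_cons.mp hs with ⟨hat, ht⟩
    rcases List.mem_cons.mp hk with rfl | hk'
    · have hkk : ¬ (k + 1 ≤ k) := by omega
      simp only [List.filter_cons, decide_eq_true_eq, if_pos hsk, if_neg hkk]
      congr 1
      apply List.filter_congr
      intro i hi
      have := hat i hi
      simp only [decide_eq_decide]
      omega
    · have hak : a < k := hat k hk'
      have has : ¬ s ≤ a := by
        intro h
        have := hmin a (List.mem_cons_self ..) h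
        omega
      simp only [List.filter_cons, decide_eq_true_eq]
      rw [if_neg (by simpa using has), if_neg (by omega)]
      exact ih ht hk' (fun i hi h => hmin i (List.mem_cons_of_mem _ hi) h)

lemma collectFind_eq (l sub : List Char) (h2 : sub.length = 2) :
    ∀ (fuel s : Nat) (acc : PySem.Set Int), s ≤ l.length → l.length + 1 - s ≤ fuel →
    (∀ x ∈ acc, x ≤ (s : Int)) →
    collectFind l sub fuel s acc =
      acc ++ ((occList l sub).filter (fun i => decide (s ≤ i))).map (fun (i : Nat) => (i : Int) + 1) := by
  intro fuel
  induction fuel with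
  | zero => intro s acc hs hf _; omega
  | succ fuel ih =>
    intro s acc hs hf hacc
    rw [collectFind]
    by_cases hk : PySem.Chars.findFrom l sub (s : Int) none = -1
    · rw [if_pos hk]
      have hno : ¬ sub <:+: l.drop s := (PySem.Chars.findFrom_natCast_eq_neg_one_iff l sub s hs).mp hk
      have hfilter : (occList l sub).filter (fun i => decide (s ≤ i)) = [] := by
        rw [List.filter_eq_nil_iff]
        intro i hi hsi
        simp only [decide_eq_true_eq] at hsi
        have hpre := (mem_occList h2).mp hi
        apply hno
        rw [← (PySem.Chars.isIn_iff_infix sub (l.drop s)),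
            ← PySem.Chars.exists_prefix_drop_iff_isIn]
        exact ⟨i - s, by rw [List.drop_drop, Nat.add_sub_cancel' hsi]; exact hpre⟩
      rw [hfilter]; simp
    · rw [if_neg hk]
      obtain ⟨hks, hpre, hmin⟩ := PySem.Chars.findFrom_natCast_spec l sub s hs hk
      set k := PySem.Chars.findFrom l sub (s : Int) none with hkdef
      have hk0 : 0 ≤ k := le_trans (by exact_mod_cast Int.natCast_nonneg s) hks
      have hkn : (k.toNat : Int) = k := Int.toNat_of_nonneg hk0
      have hsk : s ≤ k.toNat := by omega
      have hkb : k.toNat + 2 ≤ l.length := occ_bound h2 hpre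
      have hnew : (k + 1) ∉ acc := by
        intro hmem
        have := hacc _ hmem
        omega
      rw [PySem.Set.add_of_not_mem hnew]
      rw [ih (k.toNat + 1) (acc ++ [k + 1]) (by omega) (by omega)
          (by intro x hx
              rcases List.mem_append.mp hx with h | h
              · have := hacc x h; push_cast; omega
              · simp at h; push_cast; omega)]
      have hmem : k.toNat ∈ occList l sub := (mem_occList h2).mpr hpre
      have hmin' : ∀ i ∈ occList l sub, s ≤ i → k.toNat ≤ i := by
        intro i hi hsi
        by_contra hlt
        exact hmin i hsi (by omega) ((mem_occList h2).mp hi)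
      rw [filter_sorted_min (occList_pairwise l sub) hmem hsk hmin']
      simp [hkn]

/-- the whole first loop of A: r_a as a plain map over the occurrence list -/
lemma collectFind_full (l sub : List Char) (h2 : sub.length = 2) :
    collectFind l sub (l.length + 1) 0 PySem.Set.empty =
      (occList l sub).map (fun (i : Nat) => (i : Int) + 1) := by
  rw [collectFind_eq l sub h2 (l.length + 1) 0 PySem.Set.empty (by omega) (by omega)
      (by intro x hx; simp [PySem.Set.empty] at hx)]
  simp [PySem.Set.empty]

/-- the common specification both programs decide -/
def goodB (l : List Char) : Bool :=
  (occList l ['A','B']).any (fun i =>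
    (occList l ['B','A']).any (fun j => decide (i + 2 ≤ j ∨ j + 2 ≤ i)))

lemma goodB_iff (l : List Char) :
    goodB l = true ↔ ∃ i ∈ occList l ['A','B'], ∃ j ∈ occList l ['B','A'],
      i + 2 ≤ j ∨ j + 2 ≤ i := by
  simp [goodB]

lemma mem_occAB {l : List Char} {i : Nat} :
    i ∈ occList l ['A','B'] ↔ ['A','B'] <+: l.drop i := mem_occList rfl

lemma mem_occBA {l : List Char} {j : Nat} :
    j ∈ occList l ['B','A'] ↔ ['B','A'] <+: l.drop j := mem_occList rfl

/-- distinct positions in the same occurrence list differ by at least 2 -/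
lemma occList_gap2 {l : List Char} {c d : Char} (hcd : c ≠ d) {i j : Nat}
    (hi : [c,d] <+: l.drop i) (hj : [c,d] <+: l.drop j) (hij : i ≠ j) :
    i + 2 ≤ j ∨ j + 2 ≤ i := by
  by_contra h
  have h' : ¬ (i + 2 ≤ j) ∧ ¬ (j + 2 ≤ i) := ⟨fun hh => h (Or.inl hh), fun hh => h (Or.inr hh)⟩
  obtain ⟨h1, h2⟩ := h'
  rcases Nat.lt_or_ge i j with hlt | hge
  · have : j = i + 1 := by omega
    exact occ_gap hcd hi (this ▸ hj)
  · have hji : j < i := by omega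
    have : i = j + 1 := by omega
    exact occ_gap hcd hj (this ▸ hi)

/-- an AB position and a BA position are distinct -/
lemma occAB_ne_occBA {l : List Char} {i j : Nat}
    (hi : ['A','B'] <+: l.drop i) (hj : ['B','A'] <+: l.drop j) : i ≠ j := by
  rintro rfl; exact occ_ne hi hj

lemma afterLoops_spec (oa ob : List Int)
    (hpa : oa.Pairwise (· < ·)) (hpb : ob.Pairwise (· < ·))
    (hne : ∀ a ∈ oa, ∀ b ∈ ob, a ≠ b)
    (hga : ∀ a ∈ oa, ∀ a' ∈ oa, a ≠ a' → a + 2 ≤ a' ∨ a' + 2 ≤ a) :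
    afterLoops oa ob =
      if ∃ a ∈ oa, ∃ b ∈ ob, a + 2 ≤ b ∨ b + 2 ≤ a then "YES" else "NO" := by
  cases oa with
  | nil => simp [afterLoops, PySem.Set.len]
  | cons a oa =>
    cases ob with
    | nil => simp [afterLoops, PySem.Set.len]
    | cons b ob =>
      have hab : a ≠ b := hne a (List.mem_cons_self ..) b (List.mem_cons_self ..)
      cases oa with
      | nil =>
        cases ob with
        | nil =>
          simp only [afterLoops, PySem.Set.len, setPop]
          norm_num
          by_cases hadj : (a = b - 1 ∨ b = a - 1)
          · rw [if_pos hadj, if_neg (by omega : ¬ (a + 2 ≤ b ∨ b + 2 ≤ a))]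
          · rw [if_neg hadj, if_pos (by omega : a + 2 ≤ b ∨ b + 2 ≤ a)]
            simp
        | cons b2 ob =>
          simp only [afterLoops, PySem.Set.len, setPop]
          norm_num
          rw [if_neg (by omega : ¬ ((ob.length : Int) + 1 + 1 = 0)),
              if_neg (by omega : ¬ ((ob.length : Int) + 1 = 0))]
          norm_num
          have hab2 : a ≠ b2 := hne a (List.mem_cons_self ..) b2 (by simp)
          have hiff : ((¬b = a + 1 ∧ ¬b = a - 1) ∨ (¬b2 = a + 1 ∧ ¬b2 = a - 1) ∨
              ∃ x ∈ ob, ¬x = a + 1 ∧ ¬x = a - 1) ↔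
              ((a + 2 ≤ b ∨ b + 2 ≤ a) ∨ (a + 2 ≤ b2 ∨ b2 + 2 ≤ a) ∨
                ∃ x ∈ ob, a + 2 ≤ x ∨ x + 2 ≤ a) := by
            constructor
            · rintro (⟨h1, h2⟩ | ⟨h1, h2⟩ | ⟨x, hx, h1, h2⟩)
              · left; omega
              · right; left; omega
              · have hax : a ≠ x := hne a (List.mem_cons_self ..) x (by simp [hx])
                right; right; exact ⟨x, hx, by omega⟩
            · rintro (h | h | ⟨x, hx, h⟩)
              · left; omega
              · right; left; omega
              · right; right; exact ⟨x, hx, by omega⟩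
          rw [if_congr hiff rfl rfl]
      | cons a2 oa =>
        cases ob with
        | nil =>
          simp only [afterLoops, PySem.Set.len, setPop]
          norm_num
          rw [if_neg (by omega : ¬ ((oa.length : Int) + 1 + 1 = 0)),
              if_neg (by omega : ¬ ((oa.length : Int) + 1 = 0))]
          norm_num
          have ha2b : a2 ≠ b := hne a2 (by simp) b (List.mem_cons_self ..)
          have hiff : ((¬a = b + 1 ∧ ¬a = b - 1) ∨ (¬a2 = b + 1 ∧ ¬a2 = b - 1) ∨
              ∃ x ∈ oa, ¬x = b + 1 ∧ ¬x = b - 1) ↔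
              ((a + 2 ≤ b ∨ b + 2 ≤ a) ∨ (a2 + 2 ≤ b ∨ b + 2 ≤ a2) ∨
                ∃ x ∈ oa, x + 2 ≤ b ∨ b + 2 ≤ x) := by
            constructor
            · rintro (⟨h1, h2⟩ | ⟨h1, h2⟩ | ⟨x, hx, h1, h2⟩)
              · left; omega
              · right; left; omega
              · have hxb : x ≠ b := hne x (by simp [hx]) b (List.mem_cons_self ..)
                right; right; exact ⟨x, hx, by omega⟩
            · rintro (h | h | ⟨x, hx, h⟩)
              · left; omega
              · right; left; omega
              · right; right; exact ⟨x, hx, by omega⟩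
          rw [if_congr hiff rfl rfl]
        | cons b2 ob =>
          -- both sides have at least two occurrences: a non-overlapping pair always exists
          have haa2 : a < a2 := (List.pairwise_cons.mp hpa).1 a2 (List.mem_cons_self ..)
          have hbb2 : b < b2 := (List.pairwise_cons.mp hpb).1 b2 (List.mem_cons_self ..)
          have hgap : a + 2 ≤ a2 :=
            by rcases hga a (List.mem_cons_self ..) a2 (by simp) (by omega) with h | h <;> omega
          have hyes : ∃ x ∈ a :: a2 :: oa, ∃ y ∈ b :: b2 :: ob, x + 2 ≤ y ∨ y + 2 ≤ x := by
            by_cases hc : a + 2 ≤ b2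
            · exact ⟨a, List.mem_cons_self .., b2, by simp, Or.inl hc⟩
            · exact ⟨a2, by simp, b, List.mem_cons_self .., Or.inr (by omega)⟩
          rw [if_pos hyes]
          simp only [afterLoops, PySem.Set.len, setPop]
          norm_num
          rw [if_neg (by omega : ¬ ((oa.length : Int) + 1 + 1 = 0 ∨ (ob.length : Int) + 1 + 1 = 0)),
              if_neg (by omega : ¬ ((oa.length : Int) + 1 = 0 ∧ (ob.length : Int) + 1 = 0))]
          norm_num

lemma pairwise_map_shift {ns : List Nat} (h : ns.Pairwise (· < ·)) :
    (ns.map (fun n : Nat => (n : Int) + 1)).Pairwise (· < ·) := by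
  refine List.pairwise_map.mpr (h.imp ?_)
  intro a b hab
  omega

lemma checkA_eq (w : String) :
    check w = if goodB w.toList then "YES" else "NO" := by
  unfold check
  simp only [collectFind_full w.toList ['A','B'] rfl, collectFind_full w.toList ['B','A'] rfl]
  rw [afterLoops_spec]
  · -- the two if-conditions agree
    have hiff : (∃ a ∈ (occList w.toList ['A','B']).map (fun n : Nat => (n : Int) + 1),
        ∃ b ∈ (occList w.toList ['B','A']).map (fun n : Nat => (n : Int) + 1),
          a + 2 ≤ b ∨ b + 2 ≤ a) ↔ goodB w.toList = true := by
      rw [goodB_iff]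
      constructor
      · rintro ⟨a, ha, b, hb, hg⟩
        rcases List.mem_map.mp ha with ⟨n, hn, rfl⟩
        rcases List.mem_map.mp hb with ⟨m, hm, rfl⟩
        exact ⟨n, hn, m, hm, by omega⟩
      · rintro ⟨n, hn, m, hm, hg⟩
        exact ⟨(n : Int) + 1, List.mem_map_of_mem hn, (m : Int) + 1,
          List.mem_map_of_mem hm, by omega⟩
    by_cases hg : goodB w.toList = true
    · rw [if_pos (hiff.mpr hg), if_pos hg]
    · rw [if_neg (fun h => hg (hiff.mp h)), if_neg hg]
  · exact pairwise_map_shift (occList_pairwise _ _)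
  · exact pairwise_map_shift (occList_pairwise _ _)
  · intro a ha b hb
    rcases List.mem_map.mp ha with ⟨n, hn, rfl⟩
    rcases List.mem_map.mp hb with ⟨m, hm, rfl⟩
    have := occAB_ne_occBA (mem_occAB.mp hn) (mem_occBA.mp hm)
    omega
  · intro a ha b hb hab
    rcases List.mem_map.mp ha with ⟨n, hn, rfl⟩
    rcases List.mem_map.mp hb with ⟨m, hm, rfl⟩
    have := occList_gap2 (by decide : 'A' ≠ 'B') (mem_occAB.mp hn) (mem_occAB.mp hm)
      (by omega)
    omega

lemma infix_iff_exists_drop (sub t : List Char) : sub <:+: t ↔ ∃ j, sub <+: t.drop j := by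
  rw [← PySem.Chars.isIn_iff_infix, ← PySem.Chars.exists_prefix_drop_iff_isIn]

/-- B's two-find condition, for either direction: the first `sub1` occurrence can be
    followed (at distance ≥ 2) by a `sub2` occurrence iff SOME such pair exists. -/
lemma cond_iff (l sub1 sub2 : List Char) (hs1 : sub1.length = 2) (hs2 : sub2.length = 2) :
    (PySem.Chars.find l sub1 ≠ -1 ∧
      PySem.Chars.findFrom l sub2 (PySem.Chars.find l sub1 + 2) none ≠ -1)
    ↔ ∃ i ∈ occList l sub1, ∃ j ∈ occList l sub2, i + 2 ≤ j := by
  have hf0 : PySem.Chars.findFrom l sub1 ((0 : Nat) : Int) none = PySem.Chars.find l sub1 := by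
    simp
  constructor
  · rintro ⟨h1, h2⟩
    obtain ⟨-, hpre, -⟩ := PySem.Chars.findFrom_natCast_spec l sub1 0 (Nat.zero_le _)
      (by rwa [hf0])
    rw [hf0] at hpre
    have hnn : 0 ≤ PySem.Chars.find l sub1 :=
      (PySem.Chars.find_nonneg_iff l sub1).mpr ((PySem.Chars.find_ne_neg_one_iff l sub1).mp h1)
    set i0 := (PySem.Chars.find l sub1).toNat with hi0
    have hbound : i0 + 2 ≤ l.length := occ_bound hs1 hpre
    have hcast : PySem.Chars.find l sub1 + 2 = ((i0 + 2 : Nat) : Int) := by push_cast; omega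
    rw [hcast] at h2
    have hinf : sub2 <:+: l.drop (i0 + 2) := by
      by_contra hno
      exact h2 ((PySem.Chars.findFrom_natCast_eq_neg_one_iff l sub2 (i0 + 2) hbound).mpr hno)
    rcases (infix_iff_exists_drop sub2 (l.drop (i0 + 2))).mp hinf with ⟨j', hj'⟩
    rw [List.drop_drop] at hj'
    exact ⟨i0, (mem_occList hs1).mpr hpre, i0 + 2 + j', (mem_occList hs2).mpr hj', by omega⟩
  · rintro ⟨i, hi, j, hj, hij⟩
    have hpi := (mem_occList hs1).mp hi
    have hpj := (mem_occList hs2).mp hj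
    have h1 : PySem.Chars.find l sub1 ≠ -1 :=
      (PySem.Chars.find_ne_neg_one_iff l sub1).mpr
        ((infix_iff_exists_drop sub1 l).mpr ⟨i, by simpa using hpi⟩)
    obtain ⟨-, hpre, hmin⟩ := PySem.Chars.findFrom_natCast_spec l sub1 0 (Nat.zero_le _)
      (by rwa [hf0])
    rw [hf0] at hpre hmin
    have hnn : 0 ≤ PySem.Chars.find l sub1 :=
      (PySem.Chars.find_nonneg_iff l sub1).mpr ((PySem.Chars.find_ne_neg_one_iff l sub1).mp h1)
    set i0 := (PySem.Chars.find l sub1).toNat with hi0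
    have hle : i0 ≤ i := by
      by_contra hlt
      exact hmin i (Nat.zero_le _) (by omega) hpi
    have hbound : i0 + 2 ≤ l.length := occ_bound hs1 hpre
    have hcast : PySem.Chars.find l sub1 + 2 = ((i0 + 2 : Nat) : Int) := by push_cast; omega
    refine ⟨h1, ?_⟩
    rw [hcast]
    intro heq
    have hno := (PySem.Chars.findFrom_natCast_eq_neg_one_iff l sub2 (i0 + 2) hbound).mp heq
    apply hno
    apply (infix_iff_exists_drop sub2 (l.drop (i0 + 2))).mpr
    refine ⟨j - (i0 + 2), ?_⟩
    rw [List.drop_drop, Nat.add_sub_cancel' (by omega)]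
    exact hpj

lemma goodB_split (l : List Char) :
    goodB l = true ↔
      ((∃ i ∈ occList l ['A','B'], ∃ j ∈ occList l ['B','A'], i + 2 ≤ j) ∨
       (∃ j ∈ occList l ['B','A'], ∃ i ∈ occList l ['A','B'], j + 2 ≤ i)) := by
  rw [goodB_iff]
  constructor
  · rintro ⟨i, hi, j, hj, h | h⟩
    · exact Or.inl ⟨i, hi, j, hj, h⟩
    · exact Or.inr ⟨j, hj, i, hi, h⟩
  · rintro (⟨i, hi, j, hj, h⟩ | ⟨j, hj, i, hi, h⟩)
    · exact ⟨i, hi, j, hj, Or.inl h⟩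
    · exact ⟨i, hi, j, hj, Or.inr h⟩

lemma checkB_eq (w : String) :
    check_alt w = if goodB w.toList then "YES" else "NO" := by
  unfold check_alt
  simp only [PySem.Str.find_eq, PySem.Str.findFrom_eq,
    show "AB".toList = ['A','B'] from rfl, show "BA".toList = ['B','A'] from rfl]
  by_cases h1 : (PySem.Chars.find w.toList ['A','B'] ≠ -1 ∧
      PySem.Chars.findFrom w.toList ['B','A']
        (PySem.Chars.find w.toList ['A','B'] + 2) none ≠ -1)
  · rw [if_pos h1, if_pos ((goodB_split w.toList).mpr
      (Or.inl ((cond_iff w.toList ['A','B'] ['B','A'] rfl rfl).mp h1)))]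
  · rw [if_neg h1]
    by_cases h2 : (PySem.Chars.find w.toList ['B','A'] ≠ -1 ∧
        PySem.Chars.findFrom w.toList ['A','B']
          (PySem.Chars.find w.toList ['B','A'] + 2) none ≠ -1)
    · rw [if_pos h2, if_pos ((goodB_split w.toList).mpr
        (Or.inr ((cond_iff w.toList ['B','A'] ['A','B'] rfl rfl).mp h2)))]
    · rw [if_neg h2, if_neg ?_]
      intro hg
      rcases (goodB_split w.toList).mp hg with h | h
      · exact h1 ((cond_iff w.toList ['A','B'] ['B','A'] rfl rfl).mpr h)
      · exact h2 ((cond_iff w.toList ['B','A'] ['A','B'] rfl rfl).mpr h)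

-- ===== VERDICT (by name: the statement is the Claim_ definition above) =====
theorem check_spec : Claim_equal_check := by
  intro w _
  unfold Spec_check
  rw [checkA_eq, checkB_eq]
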